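-- pv_equiv track=rewrite | github.com/mypaint/mypaint | src/lib/alg.py | pairwise
-- ===== SOURCE A (Python) =====
-- def pairwise(seq):
--     """Pairwise sequence iterator.
--
--       >>> list(pairwise("spam"))
--       [('s', 'p'), ('p', 'a'), ('a', 'm'), ('m', 's')]
--
--     Returns {seq[i],seq[i+1], ..., seq[n],seq[0]} for seq[0...n].
--
--     """
--     n = 0
--     first_item = None
--     prev_item = None
--     for item in seq:
--         if n == 0:
--             first_item = item
--         else:
--             yield prev_item, item
--         prev_item = item
--         n += 1
--     if n > 1:
--         yield item, first_item
-- ===== SOURCE B (Python) =====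
-- def pairwise(seq):
--     """Pairwise adjacent iterator with wraparound (build-then-zip)."""
--     items = list(seq)
--     if len(items) < 2:
--         return
--     rotated = items[1:] + items[:1]
--     yield from zip(items, rotated)
-- ===== Notes on version B (the rewrite author's own statement) =====
-- stated objective: simpler
-- what changed: Replaces the streaming n/first_item/prev_item bookkeeping loop with materialize-then-zip against a rotated copy (items[1:]+items[:1]), guarded by len<2.
import Mathlib
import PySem

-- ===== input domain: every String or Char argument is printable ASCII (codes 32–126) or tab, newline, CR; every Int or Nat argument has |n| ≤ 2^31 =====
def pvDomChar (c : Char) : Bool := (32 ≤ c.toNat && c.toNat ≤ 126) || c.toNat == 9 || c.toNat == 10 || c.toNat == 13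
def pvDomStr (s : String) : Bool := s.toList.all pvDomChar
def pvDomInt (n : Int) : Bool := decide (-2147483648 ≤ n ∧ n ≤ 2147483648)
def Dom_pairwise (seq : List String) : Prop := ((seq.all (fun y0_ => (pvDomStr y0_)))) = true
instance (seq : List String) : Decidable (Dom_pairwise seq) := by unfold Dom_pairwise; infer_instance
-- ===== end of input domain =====

-- B replaces A's streaming n/first_item/prev_item bookkeeping with a single
-- zip of the list against its left rotation, guarded by len < 2 (objective: simpler).

-- ===== PORT A =====
-- generator ported as the list of its yields; loop state (n, first_item, prev_item, yields)
def pairwiseStep (s : Int × Option String × Option String × List (String × String))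
    (item : String) : Int × Option String × Option String × List (String × String) :=
  match s with
  | (n, first, prev, acc) =>
    if n == 0 then (n + 1, some item, some item, acc)
    else (n + 1, first, some item, acc ++ [(prev.getD "", item)])

def pairwise (seq : List String) : List (String × String) :=
  let r := seq.foldl pairwiseStep (0, none, none, [])
  -- final 'if n > 1: yield item, first_item' (item = prev_item after the loop)
  if r.1 > 1 then r.2.2.2 ++ [(r.2.2.1.getD "", r.2.1.getD "")] else r.2.2.2

-- ===== PORT B =====
-- items[1:] = drop 1 and items[:1] = take 1 (exact: both slice bounds are nonnegative)
def pairwise_alt (seq : List String) : List (String × String) :=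
  if seq.length < 2 then []
  else seq.zip (seq.drop 1 ++ seq.take 1)

-- ===== PRECONDITION & SPEC =====
def Spec_pairwise (seq : List String) (out : List (String × String)) : Prop := out = pairwise_alt seq
instance (seq : List String) (out : List (String × String)) : Decidable (Spec_pairwise seq out) := by unfold Spec_pairwise; infer_instance

-- ===== CLAIM (what is proved, stated in full; the proofs are below) =====
def Claim_equal_pairwise : Prop := ∀ (seq : List String), Dom_pairwise seq → Spec_pairwise seq (pairwise seq)

-- ===== LEMMAS AND PROOFS =====

/-- After the first element, A's loop just appends consecutive pairs. -/
lemma pairwise_loop (rest : List String) : ∀ (n : Int), 0 < n → ∀ (f p : String)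
    (acc : List (String × String)),
    List.foldl pairwiseStep (n, some f, some p, acc) rest =
      (n + rest.length, some f, some (List.getLastD rest p), acc ++ (p :: rest).zip rest) := by
  induction rest with
  | nil => intro n hn f p acc; simp
  | cons q rs ih =>
    intro n hn f p acc
    have hne : (n == 0) = false := by simp; omega
    simp only [List.foldl_cons, pairwiseStep, hne, Bool.false_eq_true, if_false,
      Option.getD_some]
    rw [ih (n + 1) (by omega) f q (acc ++ [(p, q)])]
    simp only [List.getLastD_cons, List.zip_cons_cons, List.length_cons, Prod.mk.injEq,
      List.append_assoc, List.singleton_append, and_true]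
    push_cast; ring

/-- Zipping against the rotated list splits off the wraparound pair. -/
lemma zip_rotate (b : List String) : ∀ (x c : String),
    (x :: b).zip (b ++ [c]) = (x :: b).zip b ++ [(List.getLastD b x, c)] := by
  induction b with
  | nil => intro x c; simp
  | cons q rs ih =>
    intro x c
    simp only [List.cons_append, List.zip_cons_cons, List.getLastD_cons]
    rw [ih q c]

-- ===== VERDICT (by name: the statement is the Claim_ definition above) =====
theorem pairwise_spec : Claim_equal_pairwise := by
  intro seq _
  unfold Spec_pairwise pairwise pairwise_alt
  match seq with
  | [] => rfl
  | [x] => rfl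
  | x :: y :: rs =>
    have h1 : List.foldl pairwiseStep (0, none, none, []) (x :: y :: rs) =
        List.foldl pairwiseStep (1, some x, some x, []) (y :: rs) := by
      simp [pairwiseStep]
    rw [h1, pairwise_loop (y :: rs) 1 (by omega) x x []]
    rw [if_pos (by simp)]
    have h2 : ¬ ((x :: y :: rs).length < 2) := by simp
    rw [if_neg h2]
    have hz := zip_rotate (y :: rs) x x
    simp only [List.cons_append] at hz
    simp [hz]
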